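-- pv_equiv track=rewrite | github.com/magimetal/dw-port-experiment | engine/save_load.py | _do_lfsr_byte
-- ===== SOURCE A (Python) =====
-- def _u8(value: int) -> int:
--     return int(value) & 0xFF
--
-- def _do_lfsr_byte(crc_lb: int, crc_ub: int, value: int) -> tuple[int, int]:
--     # SOURCE: Bank03.asm DoLFSR @ LFC2A-LFC4C.
--     data = _u8(value)
--     crclb = _u8(crc_lb)
--     crcub = _u8(crc_ub)
--     for _ in range(8):
--         a = _u8(crcub ^ data)
--         carry_from_crclb = (crclb >> 7) & 0x01
--         crclb = _u8(crclb << 1)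
--         carry_from_crcub = (crcub >> 7) & 0x01
--         crcub = _u8((crcub << 1) | carry_from_crclb)
--         data = _u8(data << 1)
--         carry = (a >> 7) & 0x01
--         if carry == 1:
--             crclb ^= 0x21
--             crcub ^= 0x10
--     return _u8(crclb), _u8(crcub)
-- ===== SOURCE B (Python) =====
-- def _do_lfsr_byte(crc_lb: int, crc_ub: int, value: int) -> tuple[int, int]:
--     # Loopless closed form of the CRC-16/XMODEM (poly 0x1021) per-byte update:
--     # the 8 shift/feedback rounds collapse into t ^= t >> 4 and three xored shifts.
--     t = (crc_ub & 0xFF) ^ (value & 0xFF)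
--     t ^= t >> 4
--     crc = (((crc_lb & 0xFF) << 8) ^ (t << 12) ^ (t << 5) ^ t) & 0xFFFF
--     return crc & 0xFF, crc >> 8
-- ===== Notes on version B (the rewrite author's own statement) =====
-- stated objective: faster
-- what changed: B replaces A's 8-round bit-serial LFSR loop (two byte registers with explicit carries) by the loopless algebraic closed form of the CRC-16/XMODEM byte update: t = high^data, t ^= t>>4, crc = (low<<8) ^ (t<<12) ^ (t<<5) ^ t.
import Mathlib
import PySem

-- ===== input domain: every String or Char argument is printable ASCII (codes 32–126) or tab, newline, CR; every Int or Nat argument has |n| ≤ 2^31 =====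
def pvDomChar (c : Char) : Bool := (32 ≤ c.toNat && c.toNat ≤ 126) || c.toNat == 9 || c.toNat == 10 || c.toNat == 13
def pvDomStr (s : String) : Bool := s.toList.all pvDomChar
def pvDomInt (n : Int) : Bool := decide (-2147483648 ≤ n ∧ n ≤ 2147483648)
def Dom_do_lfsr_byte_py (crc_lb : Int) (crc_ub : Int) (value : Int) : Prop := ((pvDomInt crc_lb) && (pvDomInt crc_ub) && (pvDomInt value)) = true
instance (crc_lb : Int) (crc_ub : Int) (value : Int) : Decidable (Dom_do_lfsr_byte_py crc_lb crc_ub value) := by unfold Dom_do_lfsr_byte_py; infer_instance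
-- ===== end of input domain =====

-- B replaces A's 8-round bit-serial LFSR loop by the loopless closed form of the
-- CRC-16/XMODEM byte update (t ^= t >> 4; crc = (lo<<8) ^ (t<<12) ^ (t<<5) ^ t).

-- ===== PORT A =====
-- Python helper _u8
def u8_py (value : Int) : Int := PySem.Int.band value 255

-- one iteration of A's for-loop; state = (data, crclb, crcub)
def lfsrStepA (st : Int × Int × Int) : Int × Int × Int :=
  let a := u8_py (PySem.Int.bxor st.2.2 st.1)
  let carry_from_crclb := PySem.Int.band (st.2.1 >>> 7) 1
  let crclb := u8_py (st.2.1 <<< 1)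
  let _carry_from_crcub := PySem.Int.band (st.2.2 >>> 7) 1   -- computed but unused, as in the Python
  let crcub := u8_py (PySem.Int.bor (st.2.2 <<< 1) carry_from_crclb)
  let data := u8_py (st.1 <<< 1)
  let carry := PySem.Int.band (a >>> 7) 1
  if carry = 1 then (data, PySem.Int.bxor crclb 33, PySem.Int.bxor crcub 16)
  else (data, crclb, crcub)

def do_lfsr_byte_py (crc_lb : Int) (crc_ub : Int) (value : Int) : Int × Int :=
  let data := u8_py value
  let crclb := u8_py crc_lb
  let crcub := u8_py crc_ub
  let st := (List.range 8).foldl (fun st _ => lfsrStepA st) (data, crclb, crcub)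
  (u8_py st.2.1, u8_py st.2.2)

-- ===== PORT B =====
def do_lfsr_byte_py_alt (crc_lb : Int) (crc_ub : Int) (value : Int) : Int × Int :=
  let t := PySem.Int.bxor (PySem.Int.band crc_ub 255) (PySem.Int.band value 255)
  let t := PySem.Int.bxor t (t >>> 4)
  let crc := PySem.Int.band
    (PySem.Int.bxor (PySem.Int.bxor (PySem.Int.bxor ((PySem.Int.band crc_lb 255) <<< 8) (t <<< 12)) (t <<< 5)) t)
    65535
  (PySem.Int.band crc 255, crc >>> 8)

-- ===== PRECONDITION & SPEC =====
def Spec_do_lfsr_byte_py (crc_lb : Int) (crc_ub : Int) (value : Int) (out : Int × Int) : Prop := out = do_lfsr_byte_py_alt crc_lb crc_ub value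
instance (crc_lb : Int) (crc_ub : Int) (value : Int) (out : Int × Int) : Decidable (Spec_do_lfsr_byte_py crc_lb crc_ub value out) := by unfold Spec_do_lfsr_byte_py; infer_instance

-- ===== CLAIM (what is proved, stated in full; the proofs are below) =====
def Claim_equal_do_lfsr_byte_py : Prop := ∀ (crc_lb : Int) (crc_ub : Int) (value : Int), Dom_do_lfsr_byte_py crc_lb crc_ub value → Spec_do_lfsr_byte_py crc_lb crc_ub value (do_lfsr_byte_py crc_lb crc_ub value)

-- ===== LEMMAS AND PROOFS =====

-- Nat model of A's loop body, with the or/add/if expressed as xors (equal on the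
-- states that actually arise, and xor-linear on ALL of ℕ³, which drives the proof).
def stepN (s : ℕ × ℕ × ℕ) : ℕ × ℕ × ℕ :=
  let c := ((((s.2.2 ^^^ s.1) &&& 255) >>> 7) &&& 1)
  ( (s.1 <<< 1) &&& 255,
    ((s.2.1 <<< 1) &&& 255) ^^^ c * 33,
    (((s.2.2 <<< 1) ^^^ ((s.2.1 >>> 7) &&& 1)) &&& 255) ^^^ c * 16 )

def iterN : ℕ → ℕ × ℕ × ℕ → ℕ × ℕ × ℕ
  | 0, s => s
  | n+1, s => stepN (iterN n s)

def x3 (a b : ℕ × ℕ × ℕ) : ℕ × ℕ × ℕ := (a.1 ^^^ b.1, a.2.1 ^^^ b.2.1, a.2.2 ^^^ b.2.2)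
def x2 (a b : ℕ × ℕ) : ℕ × ℕ := (a.1 ^^^ b.1, a.2 ^^^ b.2)

-- A's whole computation on a byte-state (data, crclb, crcub), outputs (crclb, crcub)
def OA (s : ℕ × ℕ × ℕ) : ℕ × ℕ :=
  ((iterN 8 s).2.1 &&& 255, (iterN 8 s).2.2 &&& 255)

-- B's closed form on bytes l (= crclb), u (= crcub), d (= data)
def FB (l u d : ℕ) : ℕ × ℕ :=
  let t := u ^^^ d
  let t2 := t ^^^ (t >>> 4)
  let crc := ((l <<< 8) ^^^ (t2 <<< 12) ^^^ (t2 <<< 5) ^^^ t2) &&& 65535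
  (crc &&& 255, crc >>> 8)

theorem bitle1 (x : ℕ) : x &&& 1 ≤ 1 := Nat.and_le_right

theorem mul_bit_distrib (b1 b2 c : ℕ) (h1 : b1 ≤ 1) (h2 : b2 ≤ 1) :
    (b1 ^^^ b2) * c = b1 * c ^^^ b2 * c := by
  interval_cases b1 <;> interval_cases b2 <;> simp

theorem stepN_linear (x y : ℕ × ℕ × ℕ) : stepN (x3 x y) = x3 (stepN x) (stepN y) := by
  obtain ⟨d1, l1, u1⟩ := x
  obtain ⟨d2, l2, u2⟩ := y
  simp only [stepN, x3]
  have e : (u1 ^^^ u2) ^^^ (d1 ^^^ d2) = (u1 ^^^ d1) ^^^ (u2 ^^^ d2) := by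
    simp [Nat.xor_comm, Nat.xor_left_comm]
  rw [e]
  have hsplit : ((((u1 ^^^ d1) ^^^ (u2 ^^^ d2)) &&& 255) >>> 7) &&& 1
      = ((((u1 ^^^ d1) &&& 255) >>> 7) &&& 1) ^^^ ((((u2 ^^^ d2) &&& 255) >>> 7) &&& 1) := by
    simp only [Nat.and_xor_distrib_right, Nat.shiftRight_xor_distrib]
  rw [hsplit, mul_bit_distrib _ _ 33 (bitle1 _) (bitle1 _),
    mul_bit_distrib _ _ 16 (bitle1 _) (bitle1 _)]
  refine congrArg₂ Prod.mk ?_ (congrArg₂ Prod.mk ?_ ?_)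
  · simp only [Nat.shiftLeft_xor_distrib, Nat.and_xor_distrib_right]
  · simp only [Nat.shiftLeft_xor_distrib, Nat.and_xor_distrib_right]
    simp [Nat.xor_comm, Nat.xor_left_comm]
  · simp only [Nat.shiftLeft_xor_distrib, Nat.shiftRight_xor_distrib, Nat.and_xor_distrib_right]
    simp [Nat.xor_comm, Nat.xor_left_comm, Nat.xor_assoc]

theorem iterN_linear (n : ℕ) (x y : ℕ × ℕ × ℕ) :
    iterN n (x3 x y) = x3 (iterN n x) (iterN n y) := by
  induction n with
  | zero => rfl
  | succ n ih => simp [iterN, ih, stepN_linear]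

theorem OA_linear (x y : ℕ × ℕ × ℕ) : OA (x3 x y) = x2 (OA x) (OA y) := by
  simp only [OA]
  rw [iterN_linear 8 x y]
  simp only [x3, x2, Nat.and_xor_distrib_right]

theorem FB_split (l u d : ℕ) : FB l u d = x2 (x2 (FB 0 0 d) (FB l 0 0)) (FB 0 u 0) := by
  simp only [FB, x2, Nat.zero_xor, Nat.xor_zero, Nat.zero_shiftLeft, Nat.zero_shiftRight]
  have ht : (u ^^^ d) ^^^ ((u ^^^ d) >>> 4) = (u ^^^ (u >>> 4)) ^^^ (d ^^^ (d >>> 4)) := by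
    rw [Nat.shiftRight_xor_distrib]
    simp [Nat.xor_comm, Nat.xor_left_comm, Nat.xor_assoc]
  rw [ht]
  have harg : (l <<< 8) ^^^ ((u ^^^ (u >>> 4)) ^^^ (d ^^^ (d >>> 4))) <<< 12 ^^^
        ((u ^^^ (u >>> 4)) ^^^ (d ^^^ (d >>> 4))) <<< 5 ^^^ ((u ^^^ (u >>> 4)) ^^^ (d ^^^ (d >>> 4)))
      = ((d ^^^ (d >>> 4)) <<< 12 ^^^ (d ^^^ (d >>> 4)) <<< 5 ^^^ (d ^^^ (d >>> 4)) ^^^ l <<< 8) ^^^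
        ((u ^^^ (u >>> 4)) <<< 12 ^^^ (u ^^^ (u >>> 4)) <<< 5 ^^^ (u ^^^ (u >>> 4))) := by
    simp only [Nat.shiftLeft_xor_distrib]
    simp [Nat.xor_comm, Nat.xor_left_comm, Nat.xor_assoc]
  rw [harg]
  simp only [Nat.and_xor_distrib_right, Nat.shiftRight_xor_distrib]

set_option maxRecDepth 40000 in
theorem basis_d : ∀ d, d < 256 → OA (d, 0, 0) = FB 0 0 d := by decide

set_option maxRecDepth 40000 in
theorem basis_l : ∀ l, l < 256 → OA (0, l, 0) = FB l 0 0 := by decide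

set_option maxRecDepth 40000 in
theorem basis_u : ∀ u, u < 256 → OA (0, 0, u) = FB 0 u 0 := by decide

theorem natEq (l u d : ℕ) (hl : l < 256) (hu : u < 256) (hd : d < 256) :
    OA (d, l, u) = FB l u d := by
  have h : ((d : ℕ), l, u) = x3 (x3 (d, 0, 0) (0, l, 0)) (0, 0, u) := by simp [x3]
  rw [h, OA_linear (x3 (d, 0, 0) (0, l, 0)) (0, 0, u), OA_linear (d, 0, 0) (0, l, 0),
    basis_d d hd, basis_l l hl, basis_u u hu]
  exact (FB_split l u d).symm

-- `x & 255` on an arbitrary Python int is a byte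
theorem band255_bounds (x : Int) : 0 ≤ PySem.Int.band x 255 ∧ PySem.Int.band x 255 < 256 := by
  unfold PySem.Int.band
  have h255 : Int.toNat 255 = 255 := rfl
  split_ifs with h1 h2 h2 <;> norm_num <;> try (exact absurd (by norm_num : (0:Int) ≤ 255) h2)
  · have := Nat.and_le_right (n := x.toNat) (m := Int.toNat 255)
    omega
  · have := Nat.sub_le (Int.toNat 255) (Int.toNat 255 &&& (-x).toNat - 1)
    omega

theorem or_eq_xor_carry (a b : ℕ) (hb : b ≤ 1) : (a <<< 1) ||| b = (a <<< 1) ^^^ b := by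
  apply Nat.eq_of_testBit_eq
  intro i
  rw [Nat.testBit_or, Nat.testBit_xor]
  cases i with
  | zero =>
      have h0 : (a <<< 1).testBit 0 = false := by simp
      rw [h0]
      cases b.testBit 0 <;> rfl
  | succ i =>
      have h2 : b < 2 ^ (i + 1) := lt_of_le_of_lt hb (Nat.one_lt_two_pow_iff.mpr (by omega))
      have hf : b.testBit (i + 1) = false := Nat.testBit_eq_false_of_lt h2
      rw [hf]
      cases (a <<< 1).testBit (i + 1) <;> rfl

-- one Int step of A's loop equals the cast of one Nat model step
theorem step_corr (d l u : ℕ) :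
    lfsrStepA ((d : Int), (l : Int), (u : Int)) =
      (((stepN (d, l, u)).1 : Int), ((stepN (d, l, u)).2.1 : Int), ((stepN (d, l, u)).2.2 : Int)) := by
  simp only [lfsrStepA, stepN, u8_py]
  have c255 : (255:Int) = ((255:ℕ):Int) := by norm_num
  have c33 : (33:Int) = ((33:ℕ):Int) := by norm_num
  have c16 : (16:Int) = ((16:ℕ):Int) := by norm_num
  have c1 : (1:Int) = ((1:ℕ):Int) := by norm_num
  have c7 : (7:Int) = ((7:ℕ):Int) := by norm_num
  rw [c255, c33, c16, c1, c7]
  simp only [PySem.Int.bxor_natCast, PySem.Int.band_natCast, PySem.Int.bor_natCast,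
    Int.shiftLeft_natCast, Int.shiftRight_natCast]
  rw [or_eq_xor_carry u ((l >>> 7) &&& 1) (bitle1 _)]
  have hc : (((u ^^^ d) &&& 255) >>> 7) &&& 1 ≤ 1 := bitle1 _
  have : (((u ^^^ d) &&& 255) >>> 7) &&& 1 = 0 ∨ (((u ^^^ d) &&& 255) >>> 7) &&& 1 = 1 := by omega
  rcases this with h | h <;> rw [h] <;> simp

theorem fold_corr (n : ℕ) (d l u : ℕ) :
    (List.range n).foldl (fun st _ => lfsrStepA st) ((d : Int), (l : Int), (u : Int)) =
      (((iterN n (d, l, u)).1 : Int), ((iterN n (d, l, u)).2.1 : Int), ((iterN n (d, l, u)).2.2 : Int)) := by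
  induction n with
  | zero => rfl
  | succ n ih =>
      rw [List.range_succ]
      simp only [List.foldl_append, List.foldl_cons, List.foldl_nil]
      rw [ih]
      have := step_corr (iterN n (d, l, u)).1 (iterN n (d, l, u)).2.1 (iterN n (d, l, u)).2.2
      simp only [iterN]
      exact this

-- ===== VERDICT (by name: the statement is the Claim_ definition above) =====
theorem do_lfsr_byte_py_spec : Claim_equal_do_lfsr_byte_py := by
  intro crc_lb crc_ub value _dom
  unfold Spec_do_lfsr_byte_py do_lfsr_byte_py do_lfsr_byte_py_alt u8_py
  dsimp only
  have repr : ∀ x : Int, ∃ n : ℕ, n < 256 ∧ PySem.Int.band x 255 = (n : Int) := by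
    intro x
    obtain ⟨h0, h1⟩ := band255_bounds x
    exact ⟨(PySem.Int.band x 255).toNat, by omega, (Int.toNat_of_nonneg h0).symm⟩
  obtain ⟨ln, hl, hLe⟩ := repr crc_lb
  obtain ⟨un, hu, hUe⟩ := repr crc_ub
  obtain ⟨dn, hd, hDe⟩ := repr value
  rw [hLe, hUe, hDe]
  rw [fold_corr 8 dn ln un]
  have c255 : (255:Int) = ((255:ℕ):Int) := by norm_num
  have c65535 : (65535:Int) = ((65535:ℕ):Int) := by norm_num
  have c4 : (4:Int) = ((4:ℕ):Int) := by norm_num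
  have c5 : (5:Int) = ((5:ℕ):Int) := by norm_num
  have c8i : (8:Int) = ((8:ℕ):Int) := by norm_num
  have c12 : (12:Int) = ((12:ℕ):Int) := by norm_num
  rw [c255, c65535, c4, c5, c8i, c12]
  simp only [PySem.Int.bxor_natCast, PySem.Int.band_natCast,
    Int.shiftLeft_natCast, Int.shiftRight_natCast]
  have := natEq ln un dn hl hu hd
  simp only [OA, FB] at this
  rw [Prod.ext_iff] at this
  exact congrArg₂ Prod.mk (congrArg _ this.1) (congrArg _ this.2)
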